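-- pv_equiv track=rewrite | github.com/ArsVie/Multi-Modal-Manga-Translation-Pipeline | MangaTranslator.py | _sort_bubbles
-- ===== SOURCE A (Python) =====
-- def _sort_bubbles(bubbles, row_threshold=50):
--     bubbles.sort(key=lambda b: b[1])
--     sorted_bubbles = []
--     if not bubbles:
--         return sorted_bubbles
--
--     current_row = [bubbles[0]]
--     for i in range(1, len(bubbles)):
--         if abs(bubbles[i][1] - current_row[-1][1]) < row_threshold:
--             current_row.append(bubbles[i])
--         else:
--             current_row.sort(key=lambda b: b[2], reverse=True)
--             sorted_bubbles.extend(current_row)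
--             current_row = [bubbles[i]]
--
--     current_row.sort(key=lambda b: b[2], reverse=True)
--     sorted_bubbles.extend(current_row)
--     return sorted_bubbles
-- ===== SOURCE B (Python) =====
-- def _sort_bubbles(bubbles, row_threshold=50):
--     bubbles.sort(key=lambda b: b[1])
--     keyed = []
--     row = 0
--     prev_y = None
--     for b in bubbles:
--         if prev_y is not None and abs(b[1] - prev_y) >= row_threshold:
--             row += 1
--         prev_y = b[1]
--         keyed.append((row, b))
--     keyed.sort(key=lambda rb: (rb[0], -rb[1][2]))
--     return [b for _, b in keyed]
-- ===== Notes on version B (the rewrite author's own statement) =====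
-- stated objective: alternative
-- what changed: Replaces A's group-and-sort-each-row loop by a decorate/sort/undecorate pipeline: one pass tags every bubble with a row id, then a SINGLE global stable sort by the composite key (row, -x) orders everything at once, so the per-row reverse sorts and the row buffers disappear.
import Mathlib
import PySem

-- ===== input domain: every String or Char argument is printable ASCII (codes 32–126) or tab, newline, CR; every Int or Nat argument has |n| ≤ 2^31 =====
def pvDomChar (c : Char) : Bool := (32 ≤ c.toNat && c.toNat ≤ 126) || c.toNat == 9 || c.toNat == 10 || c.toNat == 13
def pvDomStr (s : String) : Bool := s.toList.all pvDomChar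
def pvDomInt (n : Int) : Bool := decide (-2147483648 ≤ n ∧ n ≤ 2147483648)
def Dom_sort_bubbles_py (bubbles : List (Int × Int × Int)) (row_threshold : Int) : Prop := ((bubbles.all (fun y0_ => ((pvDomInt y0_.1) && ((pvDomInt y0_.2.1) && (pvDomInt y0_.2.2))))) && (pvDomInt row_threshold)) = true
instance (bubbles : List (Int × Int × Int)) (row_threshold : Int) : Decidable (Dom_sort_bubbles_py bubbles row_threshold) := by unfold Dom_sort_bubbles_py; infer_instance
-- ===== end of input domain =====

-- B replaces A's group-rows-and-sort-each-row loop by decorate/sort/undecorate: tag each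
-- bubble with a row id in one pass, then ONE global stable sort by the key (row, -x);
-- both Pythons sort the argument in place by y (same mutation); equivalence is about the return value.


-- ===== PORT A =====
-- current_row.sort(key=lambda b: b[2], reverse=True)
def pvSortDescX (row : List (Int × Int × Int)) : List (Int × Int × Int) :=
  PySem.List.sorted row (fun b => b.2.2) true

-- A's loop over range(1, len(bubbles)), iterating directly over bubbles[1:];
-- current_row[-1] is exact as getLastD because current_row is always nonempty.
def pvLoopA (rt : Int) : List (Int × Int × Int) → List (Int × Int × Int) × List (Int × Int × Int) →
    List (Int × Int × Int) × List (Int × Int × Int)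
  | [], st => st
  | b :: rest, (acc, cur) =>
    if |b.2.1 - (cur.getLastD (0, 0, 0)).2.1| < rt then
      pvLoopA rt rest (acc, cur ++ [b])
    else
      pvLoopA rt rest (acc ++ pvSortDescX cur, [b])

def sort_bubbles_py (bubbles : List (Int × Int × Int)) (row_threshold : Int) : List (Int × Int × Int) :=
  match PySem.List.sorted bubbles (fun b => b.2.1) false with
  | [] => []
  | y0 :: rest =>
    let st := pvLoopA row_threshold rest ([], [y0])
    st.1 ++ pvSortDescX st.2

-- ===== PORT B =====
-- B's decorating loop: state is (keyed list, current row id, previous y or None).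
def pvKeyB (rt : Int) : List (Int × Int × Int) →
    List (Int × (Int × Int × Int)) × Int × Option Int → List (Int × (Int × Int × Int))
  | [], (keyed, _, _) => keyed
  | b :: rest, (keyed, row, prevY) =>
    let row' := if (match prevY with
                    | some py => decide (|b.2.1 - py| ≥ rt)
                    | none => false) then row + 1 else row
    pvKeyB rt rest (keyed ++ [(row', b)], row', some b.2.1)

-- keyed.sort(key=lambda rb: (rb[0], -rb[1][2])) then undecorate
def sort_bubbles_py_alt (bubbles : List (Int × Int × Int)) (row_threshold : Int) : List (Int × Int × Int) :=
  let ys := PySem.List.sorted bubbles (fun b => b.2.1) false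
  let keyed := pvKeyB row_threshold ys ([], 0, none)
  (PySem.List.sorted2 keyed (fun rb => rb.1) (fun rb => -rb.2.2.2) false).map (fun rb => rb.2)

-- ===== PRECONDITION & SPEC =====
def Spec_sort_bubbles_py (bubbles : List (Int × Int × Int)) (row_threshold : Int) (out : List (Int × Int × Int)) : Prop := out = sort_bubbles_py_alt bubbles row_threshold
instance (bubbles : List (Int × Int × Int)) (row_threshold : Int) (out : List (Int × Int × Int)) : Decidable (Spec_sort_bubbles_py bubbles row_threshold out) := by unfold Spec_sort_bubbles_py; infer_instance

-- ===== CLAIM (what is proved, stated in full; the proofs are below) =====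
def Claim_equal_sort_bubbles_py : Prop := ∀ (bubbles : List (Int × Int × Int)) (row_threshold : Int), Dom_sort_bubbles_py bubbles row_threshold → Spec_sort_bubbles_py bubbles row_threshold (sort_bubbles_py bubbles row_threshold)

-- ===== LEMMAS AND PROOFS =====

-- Proof-side middle ground: the y-sorted list grouped into explicit rows.
def pvGroupRows (rt : Int) : List (Int × Int × Int) →
    List (List (Int × Int × Int)) × (Int × Int × Int) → List (List (Int × Int × Int))
  | [], (rows, _) => rows
  | b :: rest, (rows, prev) =>
    if |b.2.1 - prev.2.1| ≥ rt then
      pvGroupRows rt rest (rows ++ [[b]], b)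
    else
      pvGroupRows rt rest (rows.dropLast ++ [rows.getLastD [] ++ [b]], b)

-- rows tagged with their indices, flattened
def pvTag (i : Int) : List (List (Int × Int × Int)) → List (Int × (Int × Int × Int))
  | [] => []
  | r :: rs => r.map (fun b => (i, b)) ++ pvTag (i + 1) rs

-- the `before` predicate sorted2 uses for key (row, -x), reverse = False
def pvLt (a b : Int × (Int × Int × Int)) : Bool :=
  decide (a.1 < b.1) || (!decide (b.1 < a.1) && decide (-a.2.2.2 < -b.2.2.2))

theorem pvTag_concat (rows : List (List (Int × Int × Int))) (cur : List (Int × Int × Int)) (i : Int) :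
    pvTag i (rows ++ [cur]) = pvTag i rows ++ cur.map (fun b => (i + rows.length, b)) := by
  induction rows generalizing i with
  | nil => simp [pvTag]
  | cons r rs ih =>
    simp only [List.cons_append, pvTag, ih (i + 1), List.append_assoc, List.length_cons]
    congr 2
    refine List.map_congr_left (fun b _ => ?_)
    congr 1
    push_cast
    ring

-- A-side: running A's loop and flushing = flattening the grouped rows with per-row sorts.
theorem pvLoopA_eq_groupRows (rt : Int) (rest : List (Int × Int × Int)) :
    ∀ (rows : List (List (Int × Int × Int))) (cur : List (Int × Int × Int)), cur ≠ [] →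
    (pvLoopA rt rest (rows.flatMap pvSortDescX, cur)).1 ++
      pvSortDescX (pvLoopA rt rest (rows.flatMap pvSortDescX, cur)).2
    = (pvGroupRows rt rest (rows ++ [cur], cur.getLastD (0, 0, 0))).flatMap pvSortDescX := by
  induction rest with
  | nil =>
    intro rows cur _
    simp [pvLoopA, pvGroupRows]
  | cons b rest ih =>
    intro rows cur hcur
    by_cases hlt : |b.2.1 - (cur.getLastD (0, 0, 0)).2.1| < rt
    · have hge : ¬ (|b.2.1 - (cur.getLastD (0, 0, 0)).2.1| ≥ rt) := by omega
      simp only [pvLoopA, pvGroupRows, if_pos hlt, if_neg hge]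
      have h1 : (rows ++ [cur]).dropLast = rows := by simp
      have h2 : (rows ++ [cur]).getLastD [] = cur := by simp
      rw [h1, h2]
      have := ih rows (cur ++ [b]) (by simp)
      simpa [List.getLastD_concat] using this
    · have hge : |b.2.1 - (cur.getLastD (0, 0, 0)).2.1| ≥ rt := by omega
      simp only [pvLoopA, pvGroupRows, if_neg hlt, if_pos hge]
      have hflat : rows.flatMap pvSortDescX ++ pvSortDescX cur
          = (rows ++ [cur]).flatMap pvSortDescX := by simp
      rw [hflat]
      have := ih (rows ++ [cur]) [b] (by simp)
      simpa [List.getLastD_concat] using this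

-- B-side step 1: the decorating loop builds exactly the tagged grouped rows.
theorem pvKeyB_eq_tag (rt : Int) (rest : List (Int × Int × Int)) :
    ∀ (rows : List (List (Int × Int × Int))) (cur : List (Int × Int × Int)), cur ≠ [] →
    pvKeyB rt rest (pvTag 0 rows ++ cur.map (fun b => ((rows.length : Int), b)),
                    (rows.length : Int), some (cur.getLastD (0, 0, 0)).2.1)
    = pvTag 0 (pvGroupRows rt rest (rows ++ [cur], cur.getLastD (0, 0, 0))) := by
  induction rest with
  | nil =>
    intro rows cur _
    simp [pvKeyB, pvGroupRows, pvTag_concat]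
  | cons b rest ih =>
    intro rows cur hcur
    by_cases hge : |b.2.1 - (cur.getLastD (0, 0, 0)).2.1| ≥ rt
    · simp only [pvKeyB, pvGroupRows, if_pos hge, decide_eq_true_eq]
      have h3 := ih (rows ++ [cur]) [b] (by simp)
      rw [pvTag_concat] at h3
      simp only [show ([b] : List (Int × Int × Int)).getLastD (0, 0, 0) = b from rfl,
        List.map_singleton, List.length_append, List.length_singleton,
        Nat.cast_add, Nat.cast_one, zero_add] at h3
      exact h3
    · simp only [pvKeyB, pvGroupRows, if_neg hge, decide_eq_true_eq]
      have h1 : (rows ++ [cur]).dropLast = rows := by simp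
      have h2 : (rows ++ [cur]).getLastD [] = cur := by simp
      rw [h1, h2]
      have h3 := ih rows (cur ++ [b]) (by simp)
      simp only [List.getLastD_concat] at h3
      rw [← h3]
      simp

-- insertBy passes over a prefix in which nothing comes after the new element
theorem pvInsertBy_append_left {α : Type} (bef : α → α → Bool) (x : α) (l1 l2 : List α)
    (h : ∀ a ∈ l1, bef x a = false) :
    PySem.List.insertBy bef x (l1 ++ l2) = l1 ++ PySem.List.insertBy bef x l2 := by
  induction l1 with
  | nil => simp
  | cons a l1 ih =>
    simp only [List.cons_append, PySem.List.insertBy, h a (by simp)]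
    simp only [Bool.false_eq_true, if_false, List.cons_inj_right]
    exact ih (fun a ha => h a (by simp [ha]))

-- insertBy commutes with an order-preserving decoration
theorem pvInsertBy_map {α β : Type} (f : α → β) (bef : α → α → Bool) (bef' : β → β → Bool)
    (hb : ∀ a b, bef' (f a) (f b) = bef a b) (x : α) (l : List α) :
    PySem.List.insertBy bef' (f x) (l.map f) = (PySem.List.insertBy bef x l).map f := by
  induction l with
  | nil => simp [PySem.List.insertBy]
  | cons a l ih =>
    simp only [List.map_cons, PySem.List.insertBy, hb x a]
    by_cases h : bef x a = true
    · simp [h]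
    · simp only [h, Bool.false_eq_true, if_false] at *
      simp [ih]

-- inserting one whole block of row id i after an accumulator of smaller row ids
theorem pvFoldl_insert_block (i : Int) (r : List (Int × Int × Int)) :
    ∀ (acc : List (Int × (Int × Int × Int))) (s : List (Int × Int × Int)),
    (∀ p ∈ acc, p.1 < i) →
    List.foldl (fun acc x => PySem.List.insertBy pvLt x acc)
        (acc ++ s.map (fun b => (i, b))) (r.map (fun b => (i, b)))
    = acc ++ (List.foldl (fun acc x =>
        PySem.List.insertBy (fun a b => decide (b.2.2 < a.2.2)) x acc) s r).map (fun b => (i, b)) := by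
  induction r with
  | nil => intro acc s _; simp
  | cons b r ih =>
    intro acc s hacc
    simp only [List.map_cons, List.foldl_cons]
    have hpass : ∀ a ∈ acc, pvLt (i, b) a = false := by
      intro a ha
      have := hacc a ha
      simp only [pvLt]
      have h1 : ¬ (i < a.1) := by omega
      have h2 : a.1 < i := this
      simp [h1, h2]
    rw [pvInsertBy_append_left pvLt (i, b) acc _ hpass]
    have hbef : ∀ a c : Int × Int × Int,
        pvLt (i, a) (i, c) = (fun a c : Int × Int × Int => decide (c.2.2 < a.2.2)) a c := by
      intro a c
      simp only [pvLt]
      have : ¬ (i < i) := by omega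
      simp only [this, decide_false, Bool.false_or, Bool.not_false, Bool.true_and]
      rw [decide_eq_decide]
      omega
    rw [pvInsertBy_map (fun b => (i, b)) _ pvLt (fun a c => hbef a c) b s]
    exact ih acc _ hacc

-- global insertion sort of the tagged rows = tagged per-row reverse-x insertion sorts
theorem pvFoldl_insert_tag (rows : List (List (Int × Int × Int))) :
    ∀ (i : Int) (acc : List (Int × (Int × Int × Int))), (∀ p ∈ acc, p.1 < i) →
    List.foldl (fun acc x => PySem.List.insertBy pvLt x acc) acc (pvTag i rows)
    = acc ++ pvTag i (rows.map pvSortDescX) := by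
  induction rows with
  | nil => intro i acc _; simp [pvTag]
  | cons r rs ih =>
    intro i acc hacc
    simp only [pvTag, List.foldl_append, List.map_cons]
    have hblock := pvFoldl_insert_block i r acc [] hacc
    simp only [List.map_nil, List.append_nil] at hblock
    rw [hblock]
    have hsort : (List.foldl (fun acc x =>
        PySem.List.insertBy (fun a b => decide (b.2.2 < a.2.2)) x acc) [] r) = pvSortDescX r := by
      rw [pvSortDescX, PySem.List.sorted_rev_eq_foldl_insertBy]
    rw [hsort]
    have hacc' : ∀ p ∈ acc ++ (pvSortDescX r).map (fun b => (i, b)), p.1 < i + 1 := by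
      intro p hp
      rcases List.mem_append.mp hp with h | h
      · have := hacc p h; omega
      · rcases List.mem_map.mp h with ⟨b, _, rfl⟩; omega
    rw [ih (i + 1) _ hacc']
    simp

theorem pvTag_map_snd (rows : List (List (Int × Int × Int))) :
    ∀ i : Int, (pvTag i rows).map (fun rb => rb.2) = rows.flatten := by
  induction rows with
  | nil => intro i; simp [pvTag]
  | cons r rs ih => intro i; simp [pvTag, ih]

-- ===== VERDICT (by name: the statement is the Claim_ definition above) =====
theorem sort_bubbles_py_spec : Claim_equal_sort_bubbles_py := by
  intro bubbles rt _
  unfold Spec_sort_bubbles_py sort_bubbles_py sort_bubbles_py_alt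
  cases h : PySem.List.sorted bubbles (fun b => b.2.1) false with
  | nil => rfl
  | cons y0 rest =>
    simp only
    have hA := pvLoopA_eq_groupRows rt rest [] [y0] (by simp)
    simp only [List.flatMap_nil, List.nil_append,
      show ([y0] : List (Int × Int × Int)).getLastD (0, 0, 0) = y0 from rfl] at hA
    rw [hA]
    have hK := pvKeyB_eq_tag rt rest [] [y0] (by simp)
    simp only [pvTag, List.length_nil, Nat.cast_zero, List.map_singleton, List.nil_append,
      show ([y0] : List (Int × Int × Int)).getLastD (0, 0, 0) = y0 from rfl] at hK
    have hK' : pvKeyB rt rest ([(0, y0)], 0, some y0.2.1)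
        = pvTag 0 (pvGroupRows rt rest ([[y0]], y0)) := hK
    have hfirst : pvKeyB rt (y0 :: rest) ([], 0, none)
        = pvTag 0 (pvGroupRows rt rest ([[y0]], y0)) := by
      simp only [pvKeyB]
      exact hK'
    rw [hfirst]
    have hsorted2 : PySem.List.sorted2 (pvTag 0 (pvGroupRows rt rest ([[y0]], y0)))
        (fun rb => rb.1) (fun rb => -rb.2.2.2) false
        = List.foldl (fun acc x => PySem.List.insertBy pvLt x acc) []
            (pvTag 0 (pvGroupRows rt rest ([[y0]], y0))) := by
      simp only [PySem.List.sorted2]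
      rfl
    rw [hsorted2, pvFoldl_insert_tag _ 0 [] (by simp), List.nil_append, pvTag_map_snd]
    simp [List.flatMap_def]
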